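-- pv_equiv track=rewrite | github.com/mlf4aiur/SublimeConfluence | Confluence.py | parse_input_password
-- ===== SOURCE A (Python) =====
-- def parse_input_password(input_password):
--     length = len(input_password)
--     for index, _ in enumerate(input_password, 1):
--         if _ != "*":
--             character = _
--             position = index
--             break
--     else:
--         character = "*"
--         position = length
--     return (length, character, position)
-- ===== SOURCE B (Python) =====
-- def parse_input_password(input_password):
--     length = len(input_password)
--     # Binary search for the largest k such that the first k characters are all '*'.
--     # The predicate "input_password[:m] == '*' * m" is monotone in m, so binary search is correct.
--     lo, hi = 0, length
--     while lo < hi: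
--         mid = (lo + hi + 1) // 2
--         if input_password[:mid] == "*" * mid:
--             lo = mid
--         else:
--             hi = mid - 1
--     if lo < length:
--         return (length, input_password[lo], lo + 1)
--     return (length, "*", length)
-- ===== Notes on version B (the rewrite author's own statement) =====
-- stated objective: alternative
-- what changed: Replaces the linear index-tracking scan with a binary search for the largest k such that the first k characters are all asterisks (a monotone prefix predicate), then reads the answer off k.
import Mathlib
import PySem

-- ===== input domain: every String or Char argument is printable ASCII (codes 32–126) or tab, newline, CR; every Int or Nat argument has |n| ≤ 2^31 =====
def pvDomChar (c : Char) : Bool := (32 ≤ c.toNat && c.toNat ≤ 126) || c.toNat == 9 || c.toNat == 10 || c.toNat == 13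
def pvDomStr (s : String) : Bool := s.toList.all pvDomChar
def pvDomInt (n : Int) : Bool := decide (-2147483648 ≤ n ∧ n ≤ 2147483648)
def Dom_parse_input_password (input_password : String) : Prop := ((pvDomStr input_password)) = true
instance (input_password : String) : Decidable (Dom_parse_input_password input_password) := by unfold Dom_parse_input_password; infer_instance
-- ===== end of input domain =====

-- B replaces A's linear scan with a binary search on the monotone predicate "first m chars are all '*'" (alternative algorithm; not claimed faster).

-- ===== PORT A =====
-- the for/else loop of A: walk the characters carrying the 1-based index
def parseLoopA : List Char → Int → Int → Int × String × Int
  | [], length, _ => (length, "*", length)   -- for-else branch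
  | c :: rest, length, index =>
      if c ≠ '*' then (length, String.mk [c], index)
      else parseLoopA rest length (index + 1)

def parse_input_password (input_password : String) : Int × String × Int :=
  parseLoopA input_password.toList (input_password.toList.length : Int) 1

-- ===== PORT B =====
-- the while loop of B: binary search for the largest k with s[:k] == '*'*k
def bloopB (s : List Char) (lo hi : Nat) : Nat :=
  if h : lo < hi then
    let mid := (lo + hi + 1) / 2
    if s.take mid == List.replicate mid '*' then
      have : hi - mid < hi - lo := by omega
      bloopB s mid hi
    else
      have : (mid - 1) - lo < hi - lo := by omega
      bloopB s lo (mid - 1)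
  else lo
termination_by hi - lo

def parse_input_password_alt (input_password : String) : Int × String × Int :=
  let cs := input_password.toList
  let length : Int := cs.length
  let lo := bloopB cs 0 cs.length
  if lo < cs.length then (length, String.mk [cs.getD lo ' '], (lo : Int) + 1)
  else (length, "*", length)

-- ===== PRECONDITION & SPEC =====
def Spec_parse_input_password (input_password : String) (out : Int × String × Int) : Prop := out = parse_input_password_alt input_password
instance (input_password : String) (out : Int × String × Int) : Decidable (Spec_parse_input_password input_password out) := by unfold Spec_parse_input_password; infer_instance

-- ===== CLAIM (what is proved, stated in full; the proofs are below) =====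
def Claim_equal_parse_input_password : Prop := ∀ (input_password : String), Dom_parse_input_password input_password → Spec_parse_input_password input_password (parse_input_password input_password)

-- ===== LEMMAS AND PROOFS =====
theorem parseLoopA_eq (l : List Char) (length index : Int) :
    parseLoopA l length index =
      match l.dropWhile (· == '*') with
      | c :: s => (length, String.mk [c], index + ((l.length : Int) - ((c :: s).length : Int)))
      | [] => (length, "*", length) := by
  induction l generalizing index with
  | nil => simp [parseLoopA]
  | cons c rest ih =>
    by_cases hc : c = '*'
    · subst hc
      rw [show parseLoopA ('*' :: rest) length index = parseLoopA rest length (index + 1) by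
        simp [parseLoopA]]
      rw [ih]
      cases h : rest.dropWhile (· == '*') with
      | nil => simp [h]
      | cons d t =>
        simp only [List.dropWhile_cons, beq_self_eq_true, if_true, h, List.length_cons,
          Prod.mk.injEq, true_and]
        omega
    · simp [parseLoopA, hc]

-- the prefix predicate is monotone: take m all-stars ↔ m ≤ length of the star prefix
theorem take_replicate_iff (l : List Char) (m : Nat) :
    (l.take m = List.replicate m '*') ↔ m ≤ (l.takeWhile (· == '*')).length := by
  induction l generalizing m with
  | nil => cases m <;> simp [List.replicate_succ]
  | cons c rest ih =>
    cases m with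
    | zero => simp
    | succ n =>
      by_cases hc : c = '*'
      · subst hc
        simp [List.replicate_succ, ih]
      · simp [List.replicate_succ, hc]

-- dropping the star prefix leaves exactly dropWhile
theorem drop_length_takeWhile (p : Char → Bool) (l : List Char) :
    l.drop (l.takeWhile p).length = l.dropWhile p := by
  induction l with
  | nil => rfl
  | cons c rest ih =>
    by_cases hc : p c
    · simpa [List.takeWhile_cons, List.dropWhile_cons, hc] using ih
    · simp [List.takeWhile_cons, List.dropWhile_cons, hc]

-- binary-search invariant: if the answer k lies in [lo, hi], the loop returns k
theorem bloopB_eq (s : List Char) (n lo hi : Nat)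
    (hn : hi - lo ≤ n)
    (hlo : lo ≤ (s.takeWhile (· == '*')).length)
    (hhi : (s.takeWhile (· == '*')).length ≤ hi) :
    bloopB s lo hi = (s.takeWhile (· == '*')).length := by
  induction n generalizing lo hi with
  | zero =>
    rw [bloopB]
    have h : ¬ lo < hi := by omega
    simp only [dif_neg h]
    omega
  | succ n ih =>
    rw [bloopB]
    by_cases h : lo < hi
    · simp only [dif_pos h]
      have hm1 : lo < (lo + hi + 1) / 2 := by omega
      have hm2 : (lo + hi + 1) / 2 ≤ hi := by omega
      by_cases hp : s.take ((lo + hi + 1) / 2) = List.replicate ((lo + hi + 1) / 2) '*'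
      · have hmk := (take_replicate_iff s ((lo + hi + 1) / 2)).mp hp
        simp only [hp, beq_self_eq_true, if_true]
        exact ih _ _ (by omega) hmk hhi
      · have hmk : (s.takeWhile (· == '*')).length < (lo + hi + 1) / 2 := by
          by_contra hcon
          exact hp ((take_replicate_iff s ((lo + hi + 1) / 2)).mpr (by omega))
        have hb : ¬ (s.take ((lo + hi + 1) / 2) == List.replicate ((lo + hi + 1) / 2) '*') = true := by
          simpa using hp
        simp only [hb]
        exact ih _ _ (by omega) hlo (by omega)
    · simp only [dif_neg h]
      omega

-- ===== VERDICT (by name: the statement is the Claim_ definition above) =====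
theorem parse_input_password_spec : Claim_equal_parse_input_password := by
  intro str _
  unfold Spec_parse_input_password parse_input_password parse_input_password_alt
  set s := str.toList with hs
  set k := (s.takeWhile (· == '*')).length with hk
  have hsplit : s.takeWhile (· == '*') ++ s.dropWhile (· == '*') = s :=
    List.takeWhile_append_dropWhile
  have hlen : k + (s.dropWhile (· == '*')).length = s.length := by
    have h2 := congrArg List.length hsplit
    rw [List.length_append] at h2
    omega
  have hkb : bloopB s 0 s.length = k :=
    bloopB_eq s s.length 0 s.length (by omega) (Nat.zero_le _) (by omega)
  rw [parseLoopA_eq]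
  cases h : s.dropWhile (· == '*') with
  | nil =>
    have hkl : k = s.length := by rw [h] at hlen; simpa using hlen
    simp only [hkb, hkl, lt_irrefl, if_false]
  | cons c t =>
    have hklt : k < s.length := by rw [h] at hlen; simp at hlen; omega
    have hget : s.getD k ' ' = c := by
      have hdrop : s.drop k = s.dropWhile (· == '*') := drop_length_takeWhile (· == '*') s
      have hsome : s[k]? = some c := by
        have h0 : (s.drop k)[0]? = some c := by rw [hdrop, h]; rfl
        rw [List.getElem?_drop] at h0
        simpa using h0
      simp [List.getD, hsome]
    rw [h] at hlen
    simp only [hkb, hklt, if_true, hget, List.length_cons, Prod.mk.injEq, true_and]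
    simp only [List.length_cons] at hlen
    omega
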